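-- pv_equiv track=rewrite | github.com/sdpython/ensae_teaching_cs | src/ensae_teaching_cs/special/graph_distance.py | private_count_left_right
-- ===== SOURCE A (Python) =====
-- def private_count_left_right(valuesInList):
--     countLeft = {}
--     countRight = {}
--     for k, v in valuesInList:
--         i, j = v
--         if i not in countRight:
--             countRight[i] = {}
--         countRight[i][j] = countRight[i].get(j, 0) + 1
--         if j not in countLeft:
--             countLeft[j] = {}
--         countLeft[j][i] = countLeft[j].get(i, 0) + 1
--     return countLeft, countRight
-- ===== SOURCE B (Python) =====
-- def private_count_left_right(valuesInList):
--     # pass 1: flat count of (i, j) pairs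
--     cnt = {}
--     for _k, (i, j) in valuesInList:
--         cnt[(i, j)] = cnt.get((i, j), 0) + 1
--     # pass 2: reshape the flat table into the two nested dicts
--     countLeft = {}
--     countRight = {}
--     for (i, j), c in cnt.items():
--         countRight[i] = {**countRight.get(i, {}), j: c}
--         countLeft[j] = {**countLeft.get(j, {}), i: c}
--     return countLeft, countRight
-- ===== Notes on version B (the rewrite author's own statement) =====
-- stated objective: alternative
-- what changed: Replaces A's single fused loop that grows both nested dicts per element with two passes: first a flat counter keyed by the (i,j) pair, then one reshaping loop over the counter's items that writes each count into countRight[i][j] and countLeft[j][i].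
import Mathlib
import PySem

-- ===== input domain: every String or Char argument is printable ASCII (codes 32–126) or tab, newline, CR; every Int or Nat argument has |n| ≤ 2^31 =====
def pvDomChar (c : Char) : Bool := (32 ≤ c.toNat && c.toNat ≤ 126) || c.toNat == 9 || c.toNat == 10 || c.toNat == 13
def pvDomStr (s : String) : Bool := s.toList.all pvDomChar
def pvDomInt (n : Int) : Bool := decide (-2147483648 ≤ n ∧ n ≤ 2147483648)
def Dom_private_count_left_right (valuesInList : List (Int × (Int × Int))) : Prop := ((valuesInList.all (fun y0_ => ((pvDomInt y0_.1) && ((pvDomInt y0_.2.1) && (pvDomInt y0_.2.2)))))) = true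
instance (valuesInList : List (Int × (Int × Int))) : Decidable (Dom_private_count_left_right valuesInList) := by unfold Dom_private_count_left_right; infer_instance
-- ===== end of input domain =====

-- B replaces A's fused single loop with a flat (i,j)-pair counter pass followed by a separate reshaping pass (alternative decomposition, same cost).

-- ===== PORT A =====
-- one iteration of A's loop on one of the two dicts ('if i not in countRight: countRight[i] = {}' then 'countRight[i][j] = countRight[i].get(j, 0) + 1')
def pvAStep (d : PySem.Dict Int (PySem.Dict Int Int)) (i j : Int) : PySem.Dict Int (PySem.Dict Int Int) :=
  let d0 := if d.contains i then d else d.insert i PySem.Dict.empty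
  d0.insert i ((d0.getD i PySem.Dict.empty).insert j ((d0.getD i PySem.Dict.empty).getD j 0 + 1))

-- 'return countLeft, countRight' (nested dicts rendered as association lists; shared by both ports)
def pvReturn (st : PySem.Dict Int (PySem.Dict Int Int) × PySem.Dict Int (PySem.Dict Int Int)) : (List (Int × List (Int × Int))) × (List (Int × List (Int × Int))) :=
  (st.1.items.map (fun p => (p.1, p.2.items)), st.2.items.map (fun p => (p.1, p.2.items)))

def private_count_left_right (valuesInList : List (Int × (Int × Int))) : (List (Int × List (Int × Int))) × (List (Int × List (Int × Int))) :=
  pvReturn (valuesInList.foldl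
    (fun s kv => (pvAStep s.1 kv.2.2 kv.2.1, pvAStep s.2 kv.2.1 kv.2.2))
    (PySem.Dict.empty, PySem.Dict.empty))

-- ===== PORT B =====
def private_count_left_right_alt (valuesInList : List (Int × (Int × Int))) : (List (Int × List (Int × Int))) × (List (Int × List (Int × Int))) :=
  -- pass 1: flat count of (i, j) pairs; pass 2: reshape over its items
  -- ('countRight[i] = {**countRight.get(i, {}), j: c}' and symmetrically for countLeft)
  pvReturn ((valuesInList.foldl (fun d kv => d.insert kv.2 (d.getD kv.2 0 + 1)) PySem.Dict.empty).items.foldl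
    (fun s q => (s.1.insert q.1.2 ((s.1.getD q.1.2 PySem.Dict.empty).insert q.1.1 q.2),
                 s.2.insert q.1.1 ((s.2.getD q.1.1 PySem.Dict.empty).insert q.1.2 q.2)))
    (PySem.Dict.empty, PySem.Dict.empty))

-- ===== PRECONDITION & SPEC =====
def Spec_private_count_left_right (valuesInList : List (Int × (Int × Int))) (out : (List (Int × List (Int × Int))) × (List (Int × List (Int × Int)))) : Prop := out = private_count_left_right_alt valuesInList
instance (valuesInList : List (Int × (Int × Int))) (out : (List (Int × List (Int × Int))) × (List (Int × List (Int × Int)))) : Decidable (Spec_private_count_left_right valuesInList out) := by unfold Spec_private_count_left_right; infer_instance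

-- ===== CLAIM (what is proved, stated in full; the proofs are below) =====
def Claim_equal_private_count_left_right : Prop := ∀ (valuesInList : List (Int × (Int × Int))), Dom_private_count_left_right valuesInList → Spec_private_count_left_right valuesInList (private_count_left_right valuesInList)

-- ===== LEMMAS AND PROOFS =====

-- B's reshaping step, parameterised by the two key extractors (right: f = .1, g = .2; left: f = .2, g = .1)
def pvBuild (f g : (Int × Int) → Int) (d : PySem.Dict Int (PySem.Dict Int Int)) (q : (Int × Int) × Int) : PySem.Dict Int (PySem.Dict Int Int) :=
  d.insert (f q.1) ((d.getD (f q.1) PySem.Dict.empty).insert (g q.1) q.2)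

-- A's step without the redundant 'insert empty'
def pvStep (f g : (Int × Int) → Int) (d : PySem.Dict Int (PySem.Dict Int Int)) (p : Int × Int) : PySem.Dict Int (PySem.Dict Int Int) :=
  d.insert (f p) ((d.getD (f p) PySem.Dict.empty).insert (g p) ((d.getD (f p) PySem.Dict.empty).getD (g p) 0 + 1))

theorem pv_insert_insert_self {ν : Type} (d : PySem.Dict Int ν) (k : Int) (v w : ν) :
    (d.insert k v).insert k w = d.insert k w := by
  apply PySem.Dict.ext
  by_cases hc : d.contains k = true
  · rw [PySem.Dict.items_insert_of_contains _ w (by rw [PySem.Dict.contains_insert]; simp),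
        PySem.Dict.items_insert_of_contains d v hc,
        PySem.Dict.items_insert_of_contains d w hc, List.map_map]
    apply List.map_congr_left
    intro p _
    by_cases h : p.1 = k <;> simp [h]
  · rw [PySem.Dict.items_insert_of_contains _ w (PySem.Dict.contains_insert_self _ _ _),
        PySem.Dict.items_insert_of_not_contains d v (by simpa using hc),
        PySem.Dict.items_insert_of_not_contains d w (by simpa using hc), List.map_append]
    have he : d.items.map (fun p => if p.1 == k then (k, w) else p) = d.items := by
      conv_rhs => rw [← List.map_id d.items]
      apply List.map_congr_left
      intro p hp
      have hne : p.1 ≠ k := by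
        intro h
        exact hc (by rw [PySem.Dict.contains_iff_mem_keys]; exact h ▸ PySem.Dict.mem_keys_of_mem_items d hp)
      simp [hne]
    rw [he]
    simp

theorem pv_insert_comm_of_contains {ν : Type} (d : PySem.Dict Int ν) (j b : Int) (v c : ν)
    (hj : d.contains j = true) (hne : j ≠ b) :
    (d.insert b c).insert j v = (d.insert j v).insert b c := by
  apply PySem.Dict.ext
  have hj' : (d.insert b c).contains j = true := by rw [PySem.Dict.contains_insert]; simp [hj]
  have hb' : (d.insert j v).contains b = d.contains b := by
    rw [PySem.Dict.contains_insert]; simp [Ne.symm hne]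
  by_cases hb : d.contains b = true
  · rw [PySem.Dict.items_insert_of_contains _ v hj',
        PySem.Dict.items_insert_of_contains d c hb,
        PySem.Dict.items_insert_of_contains _ c (by rw [hb']; exact hb),
        PySem.Dict.items_insert_of_contains d v hj,
        List.map_map, List.map_map]
    apply List.map_congr_left
    intro p _
    by_cases h1 : p.1 = j
    · simp [h1, hne]
    · by_cases h2 : p.1 = b <;> simp [h1, h2, Ne.symm hne]
  · rw [PySem.Dict.items_insert_of_contains _ v hj',
        PySem.Dict.items_insert_of_not_contains d c (by simpa using hb),
        PySem.Dict.items_insert_of_not_contains _ c (by rw [hb']; simpa using hb),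
        PySem.Dict.items_insert_of_contains d v hj,
        List.map_append]
    congr 1
    simp [Ne.symm hne]

theorem pvAStep_eq_pvStep (f g : (Int × Int) → Int) (d : PySem.Dict Int (PySem.Dict Int Int)) (p : Int × Int) :
    pvAStep d (f p) (g p) = pvStep f g d p := by
  unfold pvAStep pvStep
  by_cases hc : d.contains (f p) = true
  · simp [hc]
  · simp only [Bool.not_eq_true] at hc
    simp [hc, PySem.Dict.getD_of_not_contains d PySem.Dict.empty hc, pv_insert_insert_self]

-- inner lookup of the reshape-fold: a key pair absent from ts reads 0
theorem pv_fresh_zero (f g : (Int × Int) → Int) (ts : List ((Int × Int) × Int)) (p : Int × Int)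
    (hinj : ∀ a b : Int × Int, f a = f b → g a = g b → a = b)
    (hp : p ∉ ts.map (·.1)) :
    ((ts.foldl (pvBuild f g) PySem.Dict.empty).getD (f p) PySem.Dict.empty).getD (g p) 0 = 0 := by
  induction ts using List.reverseRecOn with
  | nil =>
    simp [PySem.Dict.getD_empty]
  | append_singleton ts q ih =>
    have hp' : p ∉ ts.map (·.1) := by simp_all
    have hpq : p ≠ q.1 := by simp_all
    rw [List.foldl_append, List.foldl_cons, List.foldl_nil]
    unfold pvBuild
    rw [PySem.Dict.getD_insert]
    by_cases hf : f p = f q.1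
    · rw [if_pos hf]
      have hg : g p ≠ g q.1 := fun hg => hpq (hinj p q.1 hf hg)
      rw [PySem.Dict.getD_insert, if_neg hg, ← hf]
      exact ih hp'
    · rw [if_neg hf]
      exact ih hp'

-- a pair present in ts (keys nodup) reads its stored count
theorem pv_mem_get (f g : (Int × Int) → Int) (ts : List ((Int × Int) × Int)) (p : Int × Int) (c : Int)
    (hinj : ∀ a b : Int × Int, f a = f b → g a = g b → a = b)
    (hn : (ts.map (·.1)).Nodup) (hm : (p, c) ∈ ts) :
    ((ts.foldl (pvBuild f g) PySem.Dict.empty).getD (f p) PySem.Dict.empty).get? (g p) = some c := by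
  induction ts using List.reverseRecOn with
  | nil => cases hm
  | append_singleton ts q ih =>
    rw [List.map_append] at hn
    have hn' : (ts.map (·.1)).Nodup := (List.nodup_append.mp hn).1
    rw [List.foldl_append, List.foldl_cons, List.foldl_nil]
    unfold pvBuild
    rcases List.mem_append.mp hm with hmem | hq
    · have hpq : p ≠ q.1 := by
        intro h
        have h1 : p ∈ ts.map (·.1) := List.mem_map.mpr ⟨(p, c), hmem, rfl⟩
        exact (List.nodup_append.mp hn).2.2 p h1 p (by simp [h]) rfl
      rw [PySem.Dict.getD_insert]
      by_cases hf : f p = f q.1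
      · rw [if_pos hf]
        have hg : g p ≠ g q.1 := fun hg => hpq (hinj p q.1 hf hg)
        rw [PySem.Dict.get?_insert, if_neg hg, ← hf]
        exact ih hn' hmem
      · rw [if_neg hf]
        exact ih hn' hmem
    · have hq' : q = (p, c) := (List.mem_singleton.mp hq).symm
      subst hq'
      dsimp only
      rw [PySem.Dict.getD_insert, if_pos rfl, PySem.Dict.get?_insert, if_pos rfl]

-- the two steps commute on distinct pairs when p's slot is already present
theorem pv_comm (f g : (Int × Int) → Int) (M : PySem.Dict Int (PySem.Dict Int Int))
    (p : Int × Int) (q : (Int × Int) × Int) (c : Int)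
    (hinj : ∀ a b : Int × Int, f a = f b → g a = g b → a = b)
    (hq : q.1 ≠ p)
    (hin : (M.getD (f p) PySem.Dict.empty).get? (g p) = some c) :
    pvStep f g (pvBuild f g M q) p = pvBuild f g (pvStep f g M p) q := by
  have houter : M.contains (f p) = true := by
    by_contra h
    rw [Bool.not_eq_true] at h
    rw [PySem.Dict.getD_of_not_contains M _ h, PySem.Dict.get?_empty] at hin
    cases hin
  have hicont : (M.getD (f p) PySem.Dict.empty).contains (g p) = true := by
    rw [PySem.Dict.contains_eq_isSome_get?, hin]; rfl
  unfold pvStep pvBuild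
  by_cases hf : f q.1 = f p
  · have hg : g q.1 ≠ g p := fun hgg => hq (hinj q.1 p hf hgg)
    have hg' : g p ≠ g q.1 := Ne.symm hg
    rw [hf]
    simp [PySem.Dict.getD_insert, hg', pv_insert_insert_self]
    congr 1
    exact pv_insert_comm_of_contains _ (g p) (g q.1) _ _ hicont hg'
  · rw [PySem.Dict.getD_insert, if_neg (fun h => hf h.symm),
        PySem.Dict.getD_insert, if_neg hf]
    exact pv_insert_comm_of_contains _ (f p) (f q.1) _ _ houter (fun h => hf h.symm)

-- bump: applying A's step for pair p to the reshape of a table containing (p,c) reshapes the bumped table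
theorem pv_bump (f g : (Int × Int) → Int) (t1 t2 : List ((Int × Int) × Int)) (p : Int × Int) (c : Int)
    (hinj : ∀ a b : Int × Int, f a = f b → g a = g b → a = b)
    (hn : ((t1 ++ (p, c) :: t2).map (·.1)).Nodup) :
    pvStep f g ((t1 ++ (p, c) :: t2).foldl (pvBuild f g) PySem.Dict.empty) p
      = (t1 ++ (p, c + 1) :: t2).foldl (pvBuild f g) PySem.Dict.empty := by
  induction t2 using List.reverseRecOn with
  | nil =>
    simp only [List.foldl_append, List.foldl_cons, List.foldl_nil]
    unfold pvStep pvBuild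
    dsimp only
    simp [pv_insert_insert_self]
  | append_singleton t2 q ih =>
    have hrw : ∀ c' : Int, t1 ++ (p, c') :: (t2 ++ [q]) = (t1 ++ (p, c') :: t2) ++ [q] := by
      intro c'; rw [List.append_assoc, List.cons_append]
    rw [hrw c] at hn
    rw [List.map_append] at hn
    rw [hrw c, hrw (c + 1)]
    have hn0 : ((t1 ++ (p, c) :: t2).map (·.1)).Nodup := (List.nodup_append.mp hn).1
    have hq : q.1 ≠ p := by
      intro h
      exact (List.nodup_append.mp hn).2.2 p (by simp) p (by simp [h]) rfl
    have hin : (((t1 ++ (p, c) :: t2).foldl (pvBuild f g) PySem.Dict.empty).getD (f p) PySem.Dict.empty).get? (g p) = some c :=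
      pv_mem_get f g _ p c hinj hn0 (by simp)
    rw [List.foldl_append (l' := [q]), List.foldl_append (l' := [q]), List.foldl_cons,
        List.foldl_cons, List.foldl_nil, List.foldl_nil]
    rw [pv_comm f g _ p q c hinj hq hin, ih hn0]

-- the core: folding A's (collapsed) step over the pair list equals reshaping the counter table
theorem pv_core (f g : (Int × Int) → Int) (ps : List (Int × Int))
    (hinj : ∀ a b : Int × Int, f a = f b → g a = g b → a = b) :
    ps.foldl (pvStep f g) PySem.Dict.empty
      = ((PySem.Set.ofList ps).map (fun k => (k, (ps.count k : Int)))).foldl (pvBuild f g) PySem.Dict.empty := by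
  induction ps using List.reverseRecOn with
  | nil => rfl
  | append_singleton ps p ih =>
    rw [List.foldl_append, List.foldl_cons, List.foldl_nil, ih,
        PySem.Set.ofList_append_singleton]
    by_cases hp : p ∈ ps
    · rw [PySem.Set.add_of_mem ((PySem.Set.mem_ofList ps p).mpr hp)]
      obtain ⟨s1, s2, hsplit⟩ := List.append_of_mem ((PySem.Set.mem_ofList ps p).mpr hp)
      have hnod : (s1 ++ p :: s2).Nodup := hsplit ▸ PySem.Set.nodup_ofList ps
      have hp1 : p ∉ s1 := fun h => (List.nodup_append.mp hnod).2.2 p h p (by simp) rfl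
      have hp2 : p ∉ s2 := (List.nodup_cons.mp (List.nodup_append.mp hnod).2.1).1
      have hmape : ∀ s : List (Int × Int), p ∉ s →
          s.map (fun k => (k, ((ps ++ [p]).count k : Int))) = s.map (fun k => (k, (ps.count k : Int))) := by
        intro s hps
        apply List.map_congr_left
        intro k hk
        have hkp : k ≠ p := fun h => hps (h ▸ hk)
        simp [List.count_append, Ne.symm hkp]
      have hcp : ((ps ++ [p]).count p : Int) = (ps.count p : Int) + 1 := by
        simp [List.count_append]
      rw [hsplit]
      simp only [List.map_append, List.map_cons]
      rw [hmape s1 hp1, hmape s2 hp2, hcp]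
      have hfst : ∀ s : List (Int × Int),
          (s.map (fun k => (k, (ps.count k : Int)))).map (fun x => x.1) = s := by
        intro s
        rw [List.map_map]
        have hco : ((fun x : (Int × Int) × Int => x.1) ∘ fun k : Int × Int => (k, (ps.count k : Int))) = id := rfl
        rw [hco, List.map_id]
      have hnn : ((s1.map (fun k => (k, (ps.count k : Int))) ++ (p, (ps.count p : Int)) :: s2.map (fun k => (k, (ps.count k : Int)))).map (·.1)).Nodup := by
        have hmeq : (s1.map (fun k => (k, (ps.count k : Int))) ++ (p, (ps.count p : Int)) :: s2.map (fun k => (k, (ps.count k : Int)))).map (·.1) = s1 ++ p :: s2 := by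
          rw [List.map_append, List.map_cons, hfst s1, hfst s2]
        rw [hmeq]
        exact hnod
      exact pv_bump f g _ _ p ((ps.count p : Int)) hinj hnn
    · rw [PySem.Set.add_of_not_mem (fun h => hp ((PySem.Set.mem_ofList ps p).mp h))]
      have hmape : (PySem.Set.ofList ps).map (fun k => (k, ((ps ++ [p]).count k : Int)))
          = (PySem.Set.ofList ps).map (fun k => (k, (ps.count k : Int))) := by
        apply List.map_congr_left
        intro k hk
        have hkp : k ≠ p := fun h => hp (h ▸ (PySem.Set.mem_ofList ps k).mp hk)
        simp [List.count_append, Ne.symm hkp]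
      have hz := pv_fresh_zero f g ((PySem.Set.ofList ps).map (fun k => (k, (ps.count k : Int)))) p hinj
        (by
          intro h
          apply hp
          rw [List.map_map] at h
          have hco : ((fun x : (Int × Int) × Int => x.1) ∘ fun k : Int × Int => (k, (ps.count k : Int))) = id := rfl
          rw [hco, List.map_id] at h
          exact (PySem.Set.mem_ofList ps p).mp h)
      have hc0 : ((ps ++ [p]).count p : Int) = 1 := by
        simp [List.count_append, List.count_eq_zero.mpr hp]
      rw [List.map_append, hmape, List.map_cons, List.map_nil,
          List.foldl_append, List.foldl_cons, List.foldl_nil, hc0]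
      generalize hM : ((PySem.Set.ofList ps).map (fun k => (k, (ps.count k : Int)))).foldl (pvBuild f g) PySem.Dict.empty = M
      rw [hM] at hz
      unfold pvStep pvBuild
      dsimp only
      rw [hz, zero_add]

-- fold of pvAStep over a projected list is the fold of pvStep
theorem pv_fold_astep (f g : (Int × Int) → Int) (ps : List (Int × Int)) :
    ps.foldl (fun d p => pvAStep d (f p) (g p)) PySem.Dict.empty
      = ps.foldl (pvStep f g) PySem.Dict.empty := by
  have h : (fun (d : PySem.Dict Int (PySem.Dict Int Int)) (p : Int × Int) => pvAStep d (f p) (g p)) = pvStep f g :=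
    funext fun d => funext fun p => pvAStep_eq_pvStep f g d p
  rw [h]

-- ===== VERDICT (by name: the statement is the Claim_ definition above) =====
theorem private_count_left_right_spec : Claim_equal_private_count_left_right := by
  intro l _
  unfold Spec_private_count_left_right private_count_left_right private_count_left_right_alt
  have hA := PySem.List.foldl_prod_mk
      (fun (s : PySem.Dict Int (PySem.Dict Int Int)) (kv : Int × (Int × Int)) => pvAStep s kv.2.2 kv.2.1)
      (fun (s : PySem.Dict Int (PySem.Dict Int Int)) (kv : Int × (Int × Int)) => pvAStep s kv.2.1 kv.2.2)
      l PySem.Dict.empty PySem.Dict.empty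
  have hB := PySem.List.foldl_prod_mk
      (fun (s : PySem.Dict Int (PySem.Dict Int Int)) (q : (Int × Int) × Int) =>
        s.insert q.1.2 ((s.getD q.1.2 PySem.Dict.empty).insert q.1.1 q.2))
      (fun (s : PySem.Dict Int (PySem.Dict Int Int)) (q : (Int × Int) × Int) =>
        s.insert q.1.1 ((s.getD q.1.1 PySem.Dict.empty).insert q.1.2 q.2))
      (l.foldl (fun d kv => d.insert kv.2 (d.getD kv.2 0 + 1)) PySem.Dict.empty).items
      PySem.Dict.empty PySem.Dict.empty
  rw [hA, hB]
  have hcnt : l.foldl (fun d kv => d.insert kv.2 (d.getD kv.2 0 + 1)) PySem.Dict.empty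
      = PySem.Dict.counter (l.map (·.2)) := by
    have h1 := List.foldl_map (f := fun kv : Int × (Int × Int) => kv.2)
      (g := fun (d : PySem.Dict (Int × Int) Int) (x : Int × Int) => d.insert x (d.getD x 0 + 1))
      (l := l) (init := PySem.Dict.empty)
    rw [← h1, PySem.Dict.foldl_insert_getD_add_one_eq_counter]
  have hAR : l.foldl (fun s kv => pvAStep s kv.2.1 kv.2.2) PySem.Dict.empty
      = (l.map (·.2)).foldl (fun d p => pvAStep d p.1 p.2) PySem.Dict.empty := by
    have h1 := List.foldl_map (f := fun kv : Int × (Int × Int) => kv.2)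
      (g := fun (d : PySem.Dict Int (PySem.Dict Int Int)) (p : Int × Int) => pvAStep d p.1 p.2)
      (l := l) (init := PySem.Dict.empty)
    rw [h1]
  have hAL : l.foldl (fun s kv => pvAStep s kv.2.2 kv.2.1) PySem.Dict.empty
      = (l.map (·.2)).foldl (fun d p => pvAStep d p.2 p.1) PySem.Dict.empty := by
    have h1 := List.foldl_map (f := fun kv : Int × (Int × Int) => kv.2)
      (g := fun (d : PySem.Dict Int (PySem.Dict Int Int)) (p : Int × Int) => pvAStep d p.2 p.1)
      (l := l) (init := PySem.Dict.empty)
    rw [h1]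
  rw [hcnt, hAR, hAL, PySem.Dict.items_counter]
  have hinjR : ∀ a b : Int × Int, a.1 = b.1 → a.2 = b.2 → a = b := by
    intro a b h1 h2; exact Prod.ext h1 h2
  have hinjL : ∀ a b : Int × Int, a.2 = b.2 → a.1 = b.1 → a = b := by
    intro a b h2 h1; exact Prod.ext h1 h2
  have hR := (pv_fold_astep Prod.fst Prod.snd (l.map (·.2))).trans
    (pv_core Prod.fst Prod.snd (l.map (·.2)) hinjR)
  have hL := (pv_fold_astep Prod.snd Prod.fst (l.map (·.2))).trans
    (pv_core Prod.snd Prod.fst (l.map (·.2)) hinjL)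
  rw [hR, hL]
  rfl
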